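-- pv_equiv track=rewrite | github.com/marvin-g-neu/homomesy-and-parking-functions | animate.py | simulate_interval_parking
-- ===== SOURCE A (Python) =====
-- def simulate_interval_parking(alpha, beta):
--     """
--     animation for l-interval PF_n
--     """
--     n = len(alpha)
--     frames = []
--     assignment = [None]*n
--     used_spots = set()
--
--     frames.append(assignment[:])
--
--     for i in range(n):
--         # try each spot in interval [a_i, b_i]
--         parked = False
--         for spot in range(alpha[i], beta[i] + 1):
--             if spot not in used_spots:
--                 assignment[i] = spot
--                 used_spots.add(spot)
--                 parked = True
--                 break
--
--         # end of street
--         if not parked: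
--             assignment[i] = None
--             frames.append(assignment[:])
--
--         frames.append(assignment[:])
--
--     return frames
-- ===== SOURCE B (Python) =====
-- def _insort(sorted_list, x):
--     # insert x into a strictly increasing list, keeping it increasing
--     k = 0
--     while k < len(sorted_list) and sorted_list[k] < x:
--         k += 1
--     return sorted_list[:k] + [x] + sorted_list[k:]
--
-- def simulate_interval_parking(alpha, beta):
--     """
--     animation for l-interval PF_n
--     """
--     n = len(alpha)
--     assignment = [None] * n
--     frames = [assignment[:]]
--     used = []  # strictly increasing list of occupied spots
--     for i in range(n):
--         # smallest free spot >= alpha[i]: walk the occupied spots, not the interval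
--         cand = alpha[i]
--         for u in used:
--             if u == cand:
--                 cand += 1
--             elif u > cand:
--                 break
--         if cand <= beta[i]:
--             assignment[i] = cand
--             used = _insort(used, cand)
--             frames.append(assignment[:])
--         else:
--             frames.append(assignment[:])
--             frames.append(assignment[:])
--     return frames
-- ===== Notes on version B (the rewrite author's own statement) =====
-- stated objective: alternative
-- what changed: A finds each car's spot by scanning every integer in [alpha[i], beta[i]] against a used-spot set; B instead walks a strictly increasing list of occupied spots to compute the least free spot >= alpha[i], so per-car cost depends on cars parked, not interval width.
import Mathlib
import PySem

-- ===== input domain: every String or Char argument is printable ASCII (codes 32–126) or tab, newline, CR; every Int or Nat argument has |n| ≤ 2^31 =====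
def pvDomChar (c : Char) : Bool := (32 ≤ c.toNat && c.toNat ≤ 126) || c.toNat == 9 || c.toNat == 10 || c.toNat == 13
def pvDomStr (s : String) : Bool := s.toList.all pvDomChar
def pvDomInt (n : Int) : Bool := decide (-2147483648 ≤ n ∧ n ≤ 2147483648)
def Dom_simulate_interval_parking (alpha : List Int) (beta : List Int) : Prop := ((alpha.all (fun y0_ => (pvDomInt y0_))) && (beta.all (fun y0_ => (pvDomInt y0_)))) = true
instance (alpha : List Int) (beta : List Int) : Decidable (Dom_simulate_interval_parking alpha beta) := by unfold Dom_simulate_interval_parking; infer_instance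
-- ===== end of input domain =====

-- B replaces A's spot-by-spot scan of the interval [alpha[i], beta[i]] by a walk over the
-- (strictly increasing) list of occupied spots, so its cost no longer depends on the interval width.
-- ===== PORT A =====
-- inner loop 'for spot in range(alpha[i], beta[i]+1): if spot not in used_spots: break'
-- transliterated as step-by-step iteration (fuel = length of the range), returning the parked spot
def pyScanA (used : PySem.Set Int) (s : Int) : Nat → Option Int
  | 0 => none
  | Nat.succ f => if s ∈ used then pyScanA used (s + 1) f else some s

def stepA (alpha beta : List Int)
    (st : List (Option Int) × PySem.Set Int × List (List (Option Int))) (i : Nat) :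
    List (Option Int) × PySem.Set Int × List (List (Option Int)) :=
  let a := PySem.List.pyGetD alpha (i : Int) 0
  let b := PySem.List.pyGetD beta (i : Int) 0
  match pyScanA st.2.1 a (b + 1 - a).toNat with
  | some spot =>
      let asg := PySem.List.pySetD st.1 (i : Int) (some spot)
      (asg, PySem.Set.add st.2.1 spot, st.2.2 ++ [asg])
  | none =>
      let asg := PySem.List.pySetD st.1 (i : Int) none
      (asg, st.2.1, st.2.2 ++ [asg] ++ [asg])

def simulate_interval_parking (alpha : List Int) (beta : List Int) : List (List (Option Int)) :=
  let n := alpha.length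
  let assignment : List (Option Int) := List.replicate n none
  ((List.range n).foldl (stepA alpha beta) (assignment, PySem.Set.empty, [assignment])).2.2

-- ===== PORT B =====
-- _insort: 'while k < len(lst) and lst[k] < x: k += 1' — the insertion index
def pvInsortIdx : List Int → Int → Nat
  | [], _ => 0
  | u :: rest, x => if u < x then pvInsortIdx rest x + 1 else 0

-- _insort's result 'lst[:k] + [x] + lst[k:]'
def pvInsort (l : List Int) (x : Int) : List Int :=
  l.take (pvInsortIdx l x) ++ [x] ++ l.drop (pvInsortIdx l x)

-- 'for u in used: if u == cand: cand += 1; elif u > cand: break'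
def pvWalk : List Int → Int → Int
  | [], c => c
  | u :: rest, c => if u = c then pvWalk rest (c + 1) else if c < u then c else pvWalk rest c

def stepB (alpha beta : List Int)
    (st : List (Option Int) × List Int × List (List (Option Int))) (i : Nat) :
    List (Option Int) × List Int × List (List (Option Int)) :=
  let c := pvWalk st.2.1 (PySem.List.pyGetD alpha (i : Int) 0)
  if c ≤ PySem.List.pyGetD beta (i : Int) 0 then
    let asg := PySem.List.pySetD st.1 (i : Int) (some c)
    (asg, pvInsort st.2.1 c, st.2.2 ++ [asg])
  else
    (st.1, st.2.1, st.2.2 ++ [st.1] ++ [st.1])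

def simulate_interval_parking_alt (alpha : List Int) (beta : List Int) : List (List (Option Int)) :=
  let n := alpha.length
  let assignment : List (Option Int) := List.replicate n none
  ((List.range n).foldl (stepB alpha beta) (assignment, ([] : List Int), [assignment])).2.2

-- ===== PRECONDITION & SPEC =====
-- A raises IndexError (beta[i]) when beta is shorter than alpha; exactly those inputs are excluded.
def Pre_simulate_interval_parking (alpha : List Int) (beta : List Int) : Prop :=
  alpha.length ≤ beta.length
instance (alpha : List Int) (beta : List Int) : Decidable (Pre_simulate_interval_parking alpha beta) := by
  unfold Pre_simulate_interval_parking; infer_instance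

def pvWitness_simulate_interval_parking : List Int × List Int := ([1, 1, 2], [2, 3, 2])

def Spec_simulate_interval_parking (alpha : List Int) (beta : List Int) (out : List (List (Option Int))) : Prop := out = simulate_interval_parking_alt alpha beta
instance (alpha : List Int) (beta : List Int) (out : List (List (Option Int))) : Decidable (Spec_simulate_interval_parking alpha beta out) := by unfold Spec_simulate_interval_parking; infer_instance

-- ===== CLAIM (what is proved, stated in full; the proofs are below) =====
def Claim_equal_simulate_interval_parking : Prop := ∀ (alpha : List Int) (beta : List Int), Dom_simulate_interval_parking alpha beta → Pre_simulate_interval_parking alpha beta → Spec_simulate_interval_parking alpha beta (simulate_interval_parking alpha beta)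

-- ===== LEMMAS AND PROOFS =====

-- pvWalk returns at least its starting candidate
theorem pvWalk_ge (l : List Int) (c : Int) : c ≤ pvWalk l c := by
  induction l generalizing c with
  | nil => simp [pvWalk]
  | cons u rest ih =>
    simp only [pvWalk]
    split_ifs with h1 h2
    · exact le_trans (by omega) (ih (c + 1))
    · exact le_refl c
    · exact ih c

-- on a strictly increasing list, pvWalk's result is not occupied
theorem pvWalk_not_mem (l : List Int) (c : Int) (hs : l.Pairwise (· < ·)) : pvWalk l c ∉ l := by
  induction l generalizing c with
  | nil => simp
  | cons u rest ih =>
    rw [List.pairwise_cons] at hs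
    simp only [pvWalk]
    split_ifs with h1 h2
    · have hge := pvWalk_ge rest (c + 1)
      have := ih (c + 1) hs.2
      simp only [List.mem_cons]
      rintro (h | h)
      · omega
      · exact this h
    · simp only [List.mem_cons]
      rintro (h | h)
      · omega
      · exact absurd (hs.1 c h) (by omega)
    · have hge := pvWalk_ge rest c
      have := ih c hs.2
      simp only [List.mem_cons]
      rintro (h | h)
      · omega
      · exact this h

-- every spot between the start and pvWalk's result is occupied
theorem pvWalk_covers (l : List Int) (c : Int) (hs : l.Pairwise (· < ·)) :
    ∀ x, c ≤ x → x < pvWalk l c → x ∈ l := by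
  induction l generalizing c with
  | nil => simp [pvWalk]
  | cons u rest ih =>
    rw [List.pairwise_cons] at hs
    intro x hcx hx
    simp only [pvWalk] at hx
    split_ifs at hx with h1 h2
    · by_cases hxc : x = c
      · simp [hxc, h1.symm]
      · exact List.mem_cons_of_mem _ (ih (c + 1) hs.2 x (by omega) hx)
    · omega
    · exact List.mem_cons_of_mem _ (ih c hs.2 x hcx hx)

-- pvInsort unfolds like a structural insertion
theorem pvInsort_cons (u : Int) (rest : List Int) (v : Int) :
    pvInsort (u :: rest) v = if u < v then u :: pvInsort rest v else v :: u :: rest := by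
  unfold pvInsort
  simp only [pvInsortIdx]
  split_ifs with h <;> simp

theorem mem_pvInsort (l : List Int) (v x : Int) : x ∈ pvInsort l v ↔ x = v ∨ x ∈ l := by
  induction l with
  | nil => simp [pvInsort, pvInsortIdx]
  | cons u rest ih =>
    rw [pvInsort_cons]
    split_ifs with h
    · simp [ih]; tauto
    · simp

theorem pairwise_pvInsort (l : List Int) (v : Int) (hs : l.Pairwise (· < ·)) (hv : v ∉ l) :
    (pvInsort l v).Pairwise (· < ·) := by
  induction l with
  | nil => simp [pvInsort, pvInsortIdx]
  | cons u rest ih =>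
    rw [List.pairwise_cons] at hs
    simp only [List.mem_cons, not_or] at hv
    rw [pvInsort_cons]
    split_ifs with h
    · rw [List.pairwise_cons]
      refine ⟨fun y hy => ?_, ih hs.2 hv.2⟩
      rcases (mem_pvInsort rest v y).mp hy with rfl | hy
      · exact h
      · exact hs.1 y hy
    · rw [List.pairwise_cons]
      refine ⟨fun y hy => ?_, List.pairwise_cons.mpr hs⟩
      rcases List.mem_cons.mp hy with rfl | hy
      · omega
      · have := hs.1 y hy; omega

-- A's interval scan, given a candidate c that is the least free spot ≥ s
theorem pyScanA_eq (U : PySem.Set Int) (c b : Int) :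
    ∀ (fuel : Nat) (s : Int), s ≤ c → (∀ x, s ≤ x → x < c → x ∈ U) → c ∉ U →
    fuel = (b + 1 - s).toNat →
    pyScanA U s fuel = if c ≤ b then some c else none := by
  intro fuel
  induction fuel with
  | zero =>
    intro s hsc hcov hc hf
    have : b < s := by omega
    simp only [pyScanA]
    rw [if_neg (by omega)]
  | succ f ih =>
    intro s hsc hcov hc hf
    have hsb : s ≤ b := by omega
    simp only [pyScanA]
    by_cases hmem : s ∈ U
    · rw [if_pos hmem]
      have hsc' : s ≠ c := fun h => hc (h ▸ hmem)
      exact ih (s + 1) (by omega) (fun x hx1 hx2 => hcov x (by omega) hx2) hc (by omega)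
    · rw [if_neg hmem]
      have : s = c := by
        by_contra h
        exact hmem (hcov s le_rfl (by omega))
      rw [this, if_pos (by omega)]

-- List.set with the value already there is the identity
theorem set_same (l : List (Option Int)) (k : Nat) (hk : k < l.length) (h : l[k] = none) :
    l.set k none = l := by
  apply List.ext_getElem
  · simp
  · intro i h1 h2
    rw [List.getElem_set]
    split_ifs with he
    · subst he; exact h.symm
    · rfl

-- the main invariant: starting from related states, the two folds produce the same frames
theorem fold_eq (alpha beta : List Int) :
    ∀ (m k : Nat) (asg : List (Option Int)) (uA : PySem.Set Int) (uB : List Int)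
      (fr : List (List (Option Int))),
      k + m ≤ alpha.length →
      asg.length = alpha.length →
      (∀ j, k ≤ j → (hj : j < asg.length) → asg[j] = none) →
      (∀ x, x ∈ uA ↔ x ∈ uB) →
      uB.Pairwise (· < ·) →
      ((List.range' k m).foldl (stepA alpha beta) (asg, uA, fr)).2.2 =
      ((List.range' k m).foldl (stepB alpha beta) (asg, uB, fr)).2.2 := by
  intro m
  induction m with
  | zero => intro k asg uA uB fr _ _ _ _ _; simp
  | succ m ih =>
    intro k asg uA uB fr hkm hlen hnone hmem hsort
    rw [List.range'_succ]
    simp only [List.foldl_cons]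
    have hk : k < alpha.length := by omega
    set a := PySem.List.pyGetD alpha (k : Int) 0 with ha
    set b := PySem.List.pyGetD beta (k : Int) 0 with hb
    have hc := pvWalk_ge uB a
    have hcnm : pvWalk uB a ∉ uB := pvWalk_not_mem uB a hsort
    have hcov : ∀ x, a ≤ x → x < pvWalk uB a → x ∈ uA := fun x h1 h2 =>
      (hmem x).mpr (pvWalk_covers uB a hsort x h1 h2)
    have hscan := pyScanA_eq uA (pvWalk uB a) b ((b + 1 - a).toNat) a hc hcov
      (fun h => hcnm ((hmem _).mp h)) rfl
    by_cases hcb : pvWalk uB a ≤ b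
    · -- parked
      rw [if_pos hcb] at hscan
      simp only [stepA, stepB, ← ha, ← hb, hscan, if_pos hcb]
      apply ih (k + 1)
      · omega
      · simp [PySem.List.pySetD_natCast, hlen]
      · intro j hj hjl
        simp only [PySem.List.pySetD_natCast] at hjl ⊢
        rw [List.getElem_set]
        rw [if_neg (by omega)]
        exact hnone j (by omega) (by simpa using hjl)
      · intro x
        rw [PySem.Set.mem_add, mem_pvInsort, hmem x]; tauto
      · have hnodup : pvWalk uB a ∉ uB := hcnm
        -- pvInsort keeps the list strictly increasing
        exact pairwise_pvInsort uB _ hsort hnodup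
    · -- not parked: A rewrites assignment[k] = None (a no-op), B leaves it alone
      rw [if_neg hcb] at hscan
      simp only [stepA, stepB, ← ha, ← hb, hscan, if_neg hcb]
      have hset : PySem.List.pySetD asg (k : Int) none = asg := by
        rw [PySem.List.pySetD_natCast]
        exact set_same asg k (by omega) (hnone k le_rfl (by omega))
      rw [hset]
      exact ih (k + 1) asg uA uB _ (by omega) hlen
        (fun j hj hjl => hnone j (by omega) hjl) hmem hsort

-- ===== VERDICT (by name: the statement is the Claim_ definition above) =====
theorem simulate_interval_parking_spec : Claim_equal_simulate_interval_parking := by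
  intro alpha beta _ _
  unfold Spec_simulate_interval_parking simulate_interval_parking simulate_interval_parking_alt
  simp only [List.range_eq_range']
  exact fold_eq alpha beta alpha.length 0 (List.replicate alpha.length (none : Option Int))
    PySem.Set.empty [] [List.replicate alpha.length (none : Option Int)]
    (by omega) (List.length_replicate) (by intro j _ hj; simp)
    (by simp [PySem.Set.empty]) (List.Pairwise.nil)
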